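-- pv_equiv track=rewrite | github.com/ermekaitygulov/made3_bigdata | HW1/mapper_stat.py | remove_inquote_comma
-- ===== SOURCE A (Python) =====
-- def remove_inquote_comma(line):
--     quote_sep = line.split('"')
--     if len(quote_sep) == 1:
--         return line
--     new_line = []
--     for i, part in enumerate(quote_sep):
--         if i % 2 != 0:
--             # part of line in quotes
--             part = part.replace(',', '')
--         new_line.append(part)
--     return '"'.join(new_line)
-- ===== SOURCE B (Python) =====
-- def remove_inquote_comma(line):
--     out = []
--     in_quote = False
--     for ch in line:
--         if ch == '"':
--             in_quote = not in_quote
--             out.append(ch)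
--         elif ch == ',' and in_quote:
--             continue
--         else:
--             out.append(ch)
--     return ''.join(out)
-- ===== Notes on version B (the rewrite author's own statement) =====
-- stated objective: idiomatic
-- what changed: Replaced the split-on-quote / replace-commas-in-odd-parts / rejoin pipeline by a single linear scan that keeps an in_quote flag and simply skips commas while inside quotes.
import Mathlib
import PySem

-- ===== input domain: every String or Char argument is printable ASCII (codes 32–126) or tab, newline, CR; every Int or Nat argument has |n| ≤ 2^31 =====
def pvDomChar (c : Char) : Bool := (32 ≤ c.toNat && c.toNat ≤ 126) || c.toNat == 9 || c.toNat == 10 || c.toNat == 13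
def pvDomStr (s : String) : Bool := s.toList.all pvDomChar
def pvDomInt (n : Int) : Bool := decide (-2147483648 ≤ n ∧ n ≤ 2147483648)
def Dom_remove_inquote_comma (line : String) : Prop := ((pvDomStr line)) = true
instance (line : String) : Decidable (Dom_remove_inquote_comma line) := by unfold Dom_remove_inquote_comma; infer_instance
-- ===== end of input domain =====

-- B replaces A's split/replace-odd-parts/rejoin pipeline by a single linear scan with an
-- in_quote flag (idiomatic; same asymptotic cost).


-- ===== PORT A =====
def remove_inquote_comma (line : String) : String :=
  let quote_sep := PySem.Chars.splitOn line.toList ['"']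
  if quote_sep.length = 1 then line
  else
    let new_line := (PySem.List.enumerate quote_sep).foldl
      (fun nl ip =>
        nl ++ [if ip.1 % 2 ≠ 0 then PySem.Chars.replace ip.2 [','] [] else ip.2]) []
    String.ofList (PySem.Chars.join ['"'] new_line)

-- ===== PORT B =====
-- the linear scan of Source B: in_quote flag carried through the characters
def altGo : Bool → List Char → List Char
  | _, [] => []
  | q, c :: rest =>
    if c = '"' then c :: altGo (!q) rest
    else if c = ',' ∧ q then altGo q rest
    else c :: altGo q rest

def remove_inquote_comma_alt (line : String) : String :=
  String.ofList (altGo false line.toList)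

-- ===== PRECONDITION & SPEC =====
def Spec_remove_inquote_comma (line : String) (out : String) : Prop := out = remove_inquote_comma_alt line
instance (line : String) (out : String) : Decidable (Spec_remove_inquote_comma line out) := by unfold Spec_remove_inquote_comma; infer_instance

-- ===== CLAIM (what is proved, stated in full; the proofs are below) =====
def Claim_equal_remove_inquote_comma : Prop := ∀ (line : String), Dom_remove_inquote_comma line → Spec_remove_inquote_comma line (remove_inquote_comma line)

-- ===== LEMMAS AND PROOFS =====

-- a simple structural version of splitting on '"'
def spA : List Char → List (List Char)
  | [] => [[]]
  | c :: rest =>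
    if c = '"' then [] :: spA rest
    else
      match spA rest with
      | [] => [[c]]
      | p :: ps => (c :: p) :: ps

theorem spA_ne_nil (cs : List Char) : spA cs ≠ [] := by
  cases cs with
  | nil => simp [spA]
  | cons c rest =>
    simp only [spA]
    split_ifs
    · simp
    · cases h : spA rest <;> simp

-- prepend a prefix onto the first part
def withPre (pre : List Char) : List (List Char) → List (List Char)
  | [] => [pre]
  | p :: ps => (pre ++ p) :: ps

theorem splitOn_go_spec (fuel : Nat) (l cur : List Char) (acc : List (List Char))
    (h : l.length < fuel) :
    PySem.Chars.splitOn.go ['"'] fuel l cur acc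
      = acc.reverse ++ withPre cur.reverse (spA l) := by
  induction fuel generalizing l cur acc with
  | zero => omega
  | succ f ih =>
    cases l with
    | nil => simp [PySem.Chars.splitOn.go, spA, withPre]
    | cons c rest =>
      simp only [PySem.Chars.splitOn.go, List.isPrefixOf]
      by_cases hc : c = '"'
      · subst hc
        rw [if_pos (by simp)]
        rw [show ((['"'] : List Char).length) = 1 from rfl]
        rw [show (('"' :: rest).drop 1) = rest from rfl]
        rw [ih rest [] (cur.reverse :: acc) (by simpa using Nat.lt_of_succ_lt_succ h)]
        simp only [spA]
        cases hs : spA rest with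
        | nil => exact absurd hs (spA_ne_nil rest)
        | cons p ps => simp [withPre]
      · rw [if_neg (by simp; exact fun hh => hc hh.symm)]
        rw [ih rest (c :: cur) acc (by simpa using Nat.lt_of_succ_lt_succ h)]
        simp only [spA, if_neg hc]
        cases hs : spA rest with
        | nil => exact absurd hs (spA_ne_nil rest)
        | cons p ps => simp [withPre]

theorem splitOn_eq_spA (cs : List Char) :
    PySem.Chars.splitOn cs ['"'] = spA cs := by
  unfold PySem.Chars.splitOn
  rw [splitOn_go_spec (cs.length + 1) cs [] [] (Nat.lt_succ_self _)]
  cases hs : spA cs with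
  | nil => exact absurd hs (spA_ne_nil cs)
  | cons p ps => simp [withPre]

theorem replace_go_spec (fuel : Nat) (l acc : List Char) (h : l.length ≤ fuel) :
    PySem.Chars.replace.go [','] [] fuel l acc
      = acc.reverse ++ l.filter (· ≠ ',') := by
  induction fuel generalizing l acc with
  | zero =>
    have : l = [] := List.eq_nil_of_length_eq_zero (Nat.le_zero.mp h)
    subst this; simp [PySem.Chars.replace.go]
  | succ f ih =>
    cases l with
    | nil => simp [PySem.Chars.replace.go]
    | cons c rest =>
      simp only [PySem.Chars.replace.go, List.isPrefixOf]
      by_cases hc : c = ','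
      · subst hc
        rw [if_pos (by simp)]
        rw [show (([','] : List Char).length) = 1 from rfl]
        rw [show ((',' :: rest).drop 1) = rest from rfl]
        rw [ih rest _ (by simpa using Nat.le_of_succ_le_succ h)]
        simp [List.filter]
      · rw [if_neg (by simp; exact fun hh => hc hh.symm)]
        rw [ih rest (c :: acc) (by simpa using Nat.le_of_succ_le_succ h)]
        simp [List.filter, hc]

theorem replace_comma_eq_filter (cs : List Char) :
    PySem.Chars.replace cs [','] [] = cs.filter (· ≠ ',') := by
  unfold PySem.Chars.replace
  rw [if_neg (by simp)]
  exact replace_go_spec cs.length cs [] le_rfl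

-- the alternating processing of the parts, boolean parity
def procB : Bool → List (List Char) → List (List Char)
  | _, [] => []
  | q, p :: ps => (if q then p.filter (· ≠ ',') else p) :: procB (!q) ps

theorem foldl_enumerate_procB (qs : List (List Char)) (s : Int) (acc : List (List Char)) :
    (PySem.List.enumerate qs s).foldl
        (fun nl ip =>
          nl ++ [if ip.1 % 2 ≠ 0 then PySem.Chars.replace ip.2 [','] [] else ip.2]) acc
      = acc ++ procB (decide (s % 2 ≠ 0)) qs := by
  induction qs generalizing s acc with
  | nil => simp [PySem.List.enumerate_nil, procB]
  | cons p ps ih =>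
    rw [PySem.List.enumerate_cons, List.foldl_cons, ih (s + 1)]
    have hpar : (decide ((s + 1) % 2 ≠ 0)) = !(decide (s % 2 ≠ 0)) := by
      rcases Int.emod_two_eq_zero_or_one s with h | h <;>
        simp [Int.add_emod, h]
    rw [hpar]
    simp only [procB, replace_comma_eq_filter]
    by_cases hq : s % 2 ≠ 0 <;> simp [hq]

theorem join_cons_head (sep : List Char) (c : Char) (p : List Char) (ps : List (List Char)) :
    PySem.Chars.join sep ((c :: p) :: ps) = c :: PySem.Chars.join sep (p :: ps) := by
  cases ps <;> simp [PySem.Chars.join, List.intercalate, List.intersperse]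

theorem procB_cons (q : Bool) (p : List Char) (ps : List (List Char)) :
    procB q (p :: ps) = (if q then p.filter (· ≠ ',') else p) :: procB (!q) ps := rfl

theorem main_scan (cs : List Char) (q : Bool) :
    PySem.Chars.join ['"'] (procB q (spA cs)) = altGo q cs := by
  induction cs generalizing q with
  | nil => cases q <;> simp [spA, procB, altGo, PySem.Chars.join_singleton]
  | cons c rest ih =>
    by_cases hc : c = '"'
    · subst hc
      cases hs : spA rest with
      | nil => exact absurd hs (spA_ne_nil rest)
      | cons p ps =>
        have hih := ih (!q)
        rw [hs] at hih
        rw [show spA ('"' :: rest) = [] :: p :: ps from by simp [spA, hs]]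
        rw [procB_cons]
        rw [show (if q then List.filter (· ≠ ',') ([] : List Char) else ([] : List Char)) = []
              from by cases q <;> simp]
        rw [procB_cons] at hih ⊢
        rw [PySem.Chars.join_cons_cons, hih]
        simp [altGo]
    · cases hs : spA rest with
      | nil => exact absurd hs (spA_ne_nil rest)
      | cons p ps =>
        have hsp : spA (c :: rest) = (c :: p) :: ps := by simp [spA, hc, hs]
        cases q with
        | false =>
          have hih := ih false
          rw [hs] at hih
          rw [hsp, procB_cons, if_neg (by simp), join_cons_head]
          rw [show (p :: procB (!false) ps) = procB false (p :: ps) from by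
                rw [procB_cons, if_neg (by simp)]]
          rw [hih]
          simp [altGo, hc]
        | true =>
          have hih := ih true
          rw [hs] at hih
          by_cases hcc : c = ','
          · subst hcc
            rw [hsp, procB_cons, if_pos rfl]
            rw [show List.filter (· ≠ ',') (',' :: p) = List.filter (· ≠ ',') p from by simp]
            rw [show (List.filter (· ≠ ',') p :: procB (!true) ps) = procB true (p :: ps) from by
                  rw [procB_cons, if_pos rfl]]
            rw [hih]
            simp [altGo, hc]
          · rw [hsp, procB_cons, if_pos rfl]
            rw [show List.filter (· ≠ ',') (c :: p) = c :: List.filter (· ≠ ',') p from by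
                  simp [hcc]]
            rw [join_cons_head]
            rw [show (List.filter (· ≠ ',') p :: procB (!true) ps) = procB true (p :: ps) from by
                  rw [procB_cons, if_pos rfl]]
            rw [hih]
            simp [altGo, hc, hcc]

theorem spA_singleton (cs p : List Char) (h : spA cs = [p]) : p = cs := by
  induction cs generalizing p with
  | nil => simp [spA] at h; simp [h]
  | cons c rest ih =>
    by_cases hc : c = '"'
    · subst hc
      simp only [spA] at h
      cases hs : spA rest with
      | nil => exact absurd hs (spA_ne_nil rest)
      | cons a as => rw [hs] at h; simp at h
    · simp only [spA, if_neg hc] at h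
      cases hs : spA rest with
      | nil => exact absurd hs (spA_ne_nil rest)
      | cons a as =>
        rw [hs] at h
        have has : as = [] ∧ p = c :: a := by cases as <;> simp_all
        obtain ⟨has1, hp⟩ := has
        subst has1
        have := ih a (by rw [hs])
        simp [hp, this]

-- ===== VERDICT (by name: the statement is the Claim_ definition above) =====
theorem remove_inquote_comma_spec : Claim_equal_remove_inquote_comma := by
  intro line _
  show remove_inquote_comma line = remove_inquote_comma_alt line
  unfold remove_inquote_comma remove_inquote_comma_alt
  rw [splitOn_eq_spA]
  by_cases hlen : (spA line.toList).length = 1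
  · rw [if_pos hlen]
    obtain ⟨p, hp⟩ := List.length_eq_one_iff.mp hlen
    have hpc := spA_singleton line.toList p hp
    subst hpc
    have hms := main_scan line.toList false
    rw [hp] at hms
    simp only [procB, if_neg (by simp : ¬(false = true)), PySem.Chars.join_singleton] at hms
    rw [← hms]
    simp [String.ofList]
  · rw [if_neg hlen]
    rw [foldl_enumerate_procB (spA line.toList) 0 []]
    simp only [List.nil_append]
    rw [show (decide ((0 : Int) % 2 ≠ 0)) = false by decide]
    rw [main_scan]
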